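-- pv_equiv track=rewrite | github.com/JasonNero/advent-of-code | 2025/python/06.py | part_two
-- ===== SOURCE A (Python) =====
-- import math
-- from dataclasses import dataclass
--
-- @dataclass
-- class Problem:
--     numbers: list[int]
--     operand: str
--
--     def solve(self) -> int:
--         match self.operand:
--             case "+":
--                 result = sum(self.numbers)
--             case "*":
--                 result = math.prod(self.numbers)
--             case _:
--                 raise ValueError(f"Unknown operand: {self.operand}")
--         return result
--
-- def part_two(input_data: str) -> int:
--     lines = input_data.splitlines()
--     problems: list[Problem] = []
--
--     # The operands mark the beginning x-coordinate of a new problem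
--     operand_indices = [i for i, c in enumerate(lines[-1]) if c in "+*"]
--
--     # Split the input columns by operand indices
--     for i in range(len(operand_indices)):
--         start_idx = operand_indices[i]
--         end_idx = (
--             operand_indices[i + 1] - 1
--             if i + 1 < len(operand_indices)
--             else len(lines[0])
--         )
--
--         # Take columns, stack them and strip whitespace before converting to integers
--         numbers = []
--         for col_idx in range(start_idx, end_idx):
--             column = "".join([line[col_idx] for line in lines[:-1]])
--             numbers.append(int(column))
--
--         operand = lines[-1][start_idx]
--         problems.append(Problem(numbers=numbers, operand=operand))
--
--     result = sum([p.solve() for p in problems])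
--     return result
-- ===== SOURCE B (Python) =====
-- import math
--
-- def part_two(input_data: str) -> int:
--     lines = input_data.splitlines()
--     *body, ops_row = lines
--     total = 0
--     pending = []  # column indices of the problem currently being scanned
--     j = len(ops_row) - 1
--     while j >= 0:
--         pending.append(j)
--         op = ops_row[j]
--         if op in "+*":
--             nums = [int("".join(line[k] for line in body)) for k in pending]
--             total += sum(nums) if op == "+" else math.prod(nums)
--             pending = []
--             j -= 1  # skip the separator column left of this problem
--         j -= 1
--     return total
-- ===== Notes on version B (the rewrite author's own statement) =====
-- stated objective: alternative
-- what changed: B replaces A's two-stage scheme (precompute all operand indices, then nested per-problem/per-column loops with start/end index arithmetic) by a single right-to-left streaming scan of the operator row that accumulates pending column indices and flushes sum/product on each operator, skipping one separator column after each flush; columns are parsed lazily only when a problem flushes.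
-- outside the precondition, e.g. on part_two('12\n*+'): A returns 3, B returns 2; on part_two('12\n+'): A returns 3, B returns 1; on part_two('123\n+'): A returns 6, B returns 1
import Mathlib
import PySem

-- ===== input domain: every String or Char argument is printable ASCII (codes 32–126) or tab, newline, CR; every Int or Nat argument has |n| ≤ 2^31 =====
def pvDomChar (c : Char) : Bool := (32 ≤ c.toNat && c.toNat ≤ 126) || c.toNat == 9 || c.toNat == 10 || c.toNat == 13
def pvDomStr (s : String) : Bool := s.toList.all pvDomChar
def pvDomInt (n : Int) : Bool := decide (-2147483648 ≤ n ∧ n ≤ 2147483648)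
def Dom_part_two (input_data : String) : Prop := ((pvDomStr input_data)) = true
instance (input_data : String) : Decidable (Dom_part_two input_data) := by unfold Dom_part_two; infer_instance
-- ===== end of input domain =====

-- B re-implements part_two as a single right-to-left streaming scan of the operator row that
-- flushes a sum/product on each operator and parses columns lazily, instead of A's two-stage
-- scheme (precompute operand indices, then nested per-problem loops) (objective: alternative).

-- ===== PORT A =====
-- Problem.solve: match on the operand (a one-character string, ported as a Char); the ValueError
-- branch is unreachable for operands drawn from "+*" and is ported as the default 0.
def pySolve (numbers : List Int) (operand : Char) : Int :=
  if operand == '+' then numbers.sum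
  else if operand == '*' then numbers.prod
  else 0

def part_two (input_data : String) : Int :=
  let lines := (PySem.Str.splitlines input_data).map String.toList
  let lastLine := PySem.List.pyGetD lines (-1) []        -- lines[-1]; IndexError (lines = []) excluded by Pre_
  -- [i for i, c in enumerate(lines[-1]) if c in "+*"]
  let operandIndices := (PySem.List.enumerate lastLine).foldl
      (fun acc p => if p.2 == '+' || p.2 == '*' then acc ++ [p.1] else acc) ([] : List Int)
  let body := PySem.List.slice lines none (some (-1))    -- lines[:-1]
  let line0len := ((PySem.List.pyGetD lines 0 []).length : Int)    -- len(lines[0])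
  let problems := (PySem.List.pyRange 0 operandIndices.length).foldl (fun probs i =>
      let startIdx := PySem.List.pyGetD operandIndices i 0
      let endIdx := if i + 1 < (operandIndices.length : Int)
        then PySem.List.pyGetD operandIndices (i + 1) 0 - 1
        else line0len
      -- "".join([line[col_idx] for line in lines[:-1]]): the single characters line[col_idx]
      -- (IndexError excluded by Pre_) joined by "" are exactly the list of those characters
      let numbers := (PySem.List.pyRange startIdx endIdx).foldl (fun nums colIdx =>
          let column := PySem.Chars.join [] (body.map (fun line => [PySem.List.pyGetD line colIdx ' ']))
          nums ++ [(PySem.Int.ofChars? column).getD 0]) ([] : List Int)   -- int(column); ValueError excluded by Pre_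
      let operand := PySem.List.pyGetD lastLine startIdx ' '
      probs ++ [(numbers, operand)]) ([] : List (List Int × Char))
  (problems.map (fun p => pySolve p.1 p.2)).sum

-- ===== PORT B =====
-- "".join(line[k] for line in body); line[k] is in range under Pre_, ported with default ' '
def altColumn (body : List (List Char)) (k : Int) : List Char :=
  body.map (fun l => PySem.List.pyGetD l k ' ')

-- the while loop: fuel f encodes the Python index j = f - 1 (f = 0 ⇔ j < 0, loop ended);
-- the flush branch does j -= 2 (skip the separator column), the other branch j -= 1
def altLoop (body : List (List Char)) (opsRow : List Char) : Nat → Int → List Int → Int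
  | 0, total, _ => total
  | j+1, total, pending =>
    if opsRow.getD j ' ' == '+' || opsRow.getD j ' ' == '*' then
      altLoop body opsRow (j - 1)
        (total + (if opsRow.getD j ' ' == '+'
          then ((pending ++ [(j : Int)]).map (fun k => (PySem.Int.ofChars? (altColumn body k)).getD 0)).sum
          else ((pending ++ [(j : Int)]).map (fun k => (PySem.Int.ofChars? (altColumn body k)).getD 0)).prod)) []
    else
      altLoop body opsRow j total (pending ++ [(j : Int)])

def part_two_alt (input_data : String) : Int :=
  let lines := (PySem.Str.splitlines input_data).map String.toList
  -- *body, ops_row = lines  (ValueError on empty input; excluded by Pre_)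
  let body := lines.dropLast
  let opsRow := lines.getLastD []
  -- j starts at len(ops_row) - 1 and counts down
  altLoop body opsRow opsRow.length 0 []

-- ===== PRECONDITION & SPEC =====
-- Pre_ excludes the inputs on which A raises (IndexError on empty input or on lines shorter than a
-- problem's columns, ValueError from int() on a non-numeric column) by requiring — once the last
-- line carries any operand — a non-empty rectangular grid whose problem columns all parse as ints;
-- requiring ALL lines equal length also excludes some ragged grids with operands on which A returns
-- (reading columns only up to len(lines[0])) — there the set of columns A reads past shorter
-- trailing lines is an accident of its indexing (see cites). Pre_ also excludes grids with two
-- ADJACENT operand columns, a malformed grid (no separator column between problems) on which A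
-- manufactures a zero-width problem and returns its empty sum/product — a degenerate corner the
-- column format does not specify (see cites).
def Pre_part_two (input_data : String) : Prop :=
  let lines := (PySem.Str.splitlines input_data).map String.toList
  let L := (lines.headD []).length
  let lastL := lines.getLastD []
  let ops := (List.range lastL.length).filter
    (fun j => lastL.getD j ' ' == '+' || lastL.getD j ' ' == '*')
  lines ≠ [] ∧
  (ops = [] ∨
    ((∀ l ∈ lines, l.length = L) ∧
     (∀ k ∈ List.range ops.length, k + 1 < ops.length →
        ops.getD k 0 + 1 < ops.getD (k + 1) 0) ∧
     (∀ k ∈ List.range ops.length, ∀ j ∈ List.range L,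
       ops.getD k 0 ≤ j →
       j < (if k + 1 < ops.length then ops.getD (k + 1) 0 - 1 else L) →
       (PySem.Int.ofChars? (lines.dropLast.map (fun l => l.getD j ' '))).isSome = true)))
instance (input_data : String) : Decidable (Pre_part_two input_data) := by
  unfold Pre_part_two; infer_instance

def pvWitness_part_two : String := "1\n+"

def Spec_part_two (input_data : String) (out : Int) : Prop := out = part_two_alt input_data
instance (input_data : String) (out : Int) : Decidable (Spec_part_two input_data out) := by unfold Spec_part_two; infer_instance

-- ===== CLAIM (what is proved, stated in full; the proofs are below) =====
def Claim_equal_part_two : Prop := ∀ (input_data : String), Dom_part_two input_data → Pre_part_two input_data → Spec_part_two input_data (part_two input_data)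

-- ===== LEMMAS AND PROOFS =====

-- the reference shape both ports are reduced to: per-problem contribution over pvOps
def pvOps (lastL : List Char) (L : Nat) : List Nat :=
  (List.range L).filter (fun j => lastL.getD j ' ' == '+' || lastL.getD j ' ' == '*')

def pvContrib (lines : List (List Char)) (L : Nat) (ops : List Nat) (k : Nat) : Int :=
  let a := ops.getD k 0
  let b := if k + 1 < ops.length then ops.getD (k + 1) 0 - 1 else L
  let nums := (List.range (b - a)).map
    (fun t => (PySem.Int.ofChars? (lines.dropLast.map (fun l => l.getD (a + t) ' '))).getD 0)
  if (lines.getLastD []).getD a ' ' == '+' then nums.sum else nums.prod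

theorem enumerate_getD {α : Type} (xs : List α) (d : α) (s : Int) :
    PySem.List.enumerate xs s = (List.range xs.length).map (fun j : Nat => (s + (j : Int), xs.getD j d)) := by
  induction xs generalizing s with
  | nil => simp [PySem.List.enumerate_nil]
  | cons x t ih =>
    rw [PySem.List.enumerate_cons, ih (s+1)]
    simp [List.range_succ_eq_map, List.map_map, Function.comp_def]
    omega

theorem opsInt_eq (lastL : List Char) (L : Nat) (h : lastL.length = L) :
    (PySem.List.enumerate lastL).foldl
      (fun acc p => if p.2 == '+' || p.2 == '*' then acc ++ [p.1] else acc) ([] : List Int)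
    = (pvOps lastL L).map (fun j : Nat => (j : Int)) := by
  rw [enumerate_getD lastL ' ' 0,
      PySem.List.foldl_append_if (fun q : Int × Char => q.2 == '+' || q.2 == '*') (fun q : Int × Char => q.1),
      List.filter_map]
  simp [pvOps, h, List.map_map, Function.comp_def]

theorem pvOps_getD_mem (lastL : List Char) (L k : Nat) (hk : k < (pvOps lastL L).length) :
    (pvOps lastL L).getD k 0 < L ∧
    (lastL.getD ((pvOps lastL L).getD k 0) ' ' == '+' || lastL.getD ((pvOps lastL L).getD k 0) ' ' == '*') = true := by
  rw [List.getD_eq_getElem _ _ hk]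
  have hmem : (pvOps lastL L)[k] ∈ pvOps lastL L := List.getElem_mem hk
  unfold pvOps at hmem
  rw [List.mem_filter] at hmem
  exact ⟨List.mem_range.mp hmem.1, hmem.2⟩

theorem pvOps_strict (lastL : List Char) (L k : Nat) (hk : k + 1 < (pvOps lastL L).length) :
    (pvOps lastL L).getD k 0 < (pvOps lastL L).getD (k+1) 0 := by
  rw [List.getD_eq_getElem _ _ (by omega), List.getD_eq_getElem _ _ hk]
  have hp : (pvOps lastL L).Pairwise (· < ·) := List.Pairwise.filter _ List.pairwise_lt_range
  exact List.pairwise_iff_getElem.mp hp k (k+1) (by omega) hk (by omega)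

theorem pvOps_mono (lastL : List Char) (L i k : Nat) (hik : i ≤ k) (hk : k < (pvOps lastL L).length) :
    (pvOps lastL L).getD i 0 ≤ (pvOps lastL L).getD k 0 := by
  rw [List.getD_eq_getElem _ _ (by omega), List.getD_eq_getElem _ _ hk]
  rcases Nat.lt_or_ge i k with h | h
  · have hp : (pvOps lastL L).Pairwise (· < ·) := List.Pairwise.filter _ List.pairwise_lt_range
    exact le_of_lt (List.pairwise_iff_getElem.mp hp i k (by omega) hk h)
  · have : i = k := by omega
    subst this; rfl

theorem pvOps_notOp (lastL : List Char) (L j : Nat) (hj : j < L)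
    (h : ∀ k, k < (pvOps lastL L).length → (pvOps lastL L).getD k 0 ≠ j) :
    (lastL.getD j ' ' == '+' || lastL.getD j ' ' == '*') = false := by
  by_contra hc
  have hmem : j ∈ pvOps lastL L := by
    unfold pvOps
    rw [List.mem_filter]
    exact ⟨List.mem_range.mpr hj, by revert hc; cases (lastL.getD j ' ' == '+' || lastL.getD j ' ' == '*') <;> simp⟩
  obtain ⟨k, hk, hkj⟩ := List.mem_iff_getElem.mp hmem
  exact h k hk (by rw [List.getD_eq_getElem _ _ hk]; exact hkj)

theorem A_eq_ref (s : String)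
    (hne : (PySem.Str.splitlines s).map String.toList ≠ [])
    (hlen : ∀ l ∈ (PySem.Str.splitlines s).map String.toList,
      l.length = (((PySem.Str.splitlines s).map String.toList).headD []).length) :
    part_two s =
      ((List.range (pvOps (((PySem.Str.splitlines s).map String.toList).getLastD [])
          (((PySem.Str.splitlines s).map String.toList).headD []).length).length).map
        (pvContrib ((PySem.Str.splitlines s).map String.toList)
          (((PySem.Str.splitlines s).map String.toList).headD []).length
          (pvOps (((PySem.Str.splitlines s).map String.toList).getLastD [])
            (((PySem.Str.splitlines s).map String.toList).headD []).length))).sum := by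
  unfold part_two
  set lines := (PySem.Str.splitlines s).map String.toList with hl
  set L := (lines.headD []).length with hL
  set lastL := lines.getLastD [] with hlast
  have hlastD : lastL = lines.getLast hne := by
    rw [hlast, List.getLastD_eq_getLast?, List.getLast?_eq_some_getLast hne]; rfl
  have hlastmem : lastL ∈ lines := hlastD ▸ List.getLast_mem hne
  have hlastlen : lastL.length = L := hlen _ hlastmem
  have hgetlast : PySem.List.pyGetD lines (-1) [] = lastL := by
    rw [PySem.List.pyGetD_neg_one lines [] hne, hlastD]
  have hget0 : PySem.List.pyGetD lines 0 [] = lines.headD [] := by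
    rw [PySem.List.pyGetD_zero]; cases lines <;> simp
  simp only [hgetlast, hget0, opsInt_eq lastL L hlastlen, PySem.List.slice_to_neg_one,
    List.length_map, PySem.List.pyRange_zero_nat,
    PySem.List.foldl_append_singleton_eq_map, List.map_map, List.nil_append]
  apply congrArg List.sum
  apply List.map_congr_left
  intro k hk
  rw [List.mem_range] at hk
  simp only [Function.comp_apply]
  set ops := pvOps lastL L with hops
  set a := ops.getD k 0 with hadef
  have haL : a < L := (pvOps_getD_mem lastL L k hk).1
  have hstart : PySem.List.pyGetD (ops.map (fun j : Nat => (j:Int))) ((k:Nat) : Int) 0 = (a : Int) := by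
    rw [PySem.List.pyGetD_natCast, List.getD_eq_getElem _ _ (by simpa using hk), List.getElem_map,
      hadef, List.getD_eq_getElem _ _ hk]
  set b := (if k + 1 < ops.length then ops.getD (k + 1) 0 - 1 else L) with hbdef
  have hab : a ≤ b := by
    rw [hbdef]; split_ifs with h
    · have := pvOps_strict lastL L k h; rw [← hops] at this; omega
    · omega
  have hbL : b ≤ L := by
    rw [hbdef]; split_ifs with h
    · have := (pvOps_getD_mem lastL L (k+1) h).1; rw [← hops] at this; omega
    · omega
  have hend : (if ((k:Nat):Int) + 1 < (ops.length : Int) then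
      PySem.List.pyGetD (ops.map (fun j : Nat => (j:Int))) (((k:Nat):Int) + 1) 0 - 1
      else (((lines.headD []).length : Nat) : Int)) = (b : Int) := by
    show _ = ((b:Nat):Int)
    rw [hbdef]
    by_cases h : k + 1 < ops.length
    · have hlt := pvOps_strict lastL L k h
      rw [← hops] at hlt
      rw [if_pos (by exact_mod_cast h), if_pos h]
      have hcast : ((k:Int) + 1) = (((k+1 : Nat)) : Int) := by push_cast; ring
      rw [hcast, PySem.List.pyGetD_natCast, List.getD_eq_getElem _ _ (by simpa using h),
        List.getElem_map, List.getD_eq_getElem _ _ h]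
      rw [List.getD_eq_getElem _ _ h, List.getD_eq_getElem _ _ (by omega)] at hlt
      omega
    · rw [if_neg (by exact_mod_cast h), if_neg h]
  rw [hstart, hend]
  have hrange : PySem.List.pyRange ((a:Nat):Int) ((b:Nat):Int)
      = (List.range (b - a)).map (fun t : Nat => (((a + t : Nat)) : Int)) := by
    rw [PySem.List.pyRange_one]
    have hba : (((b:Nat):Int) - ((a:Nat):Int)).toNat = b - a := by omega
    rw [hba]
    apply List.map_congr_left; intro t ht; push_cast; ring
  rw [hrange, List.map_map, PySem.List.pyGetD_natCast lastL a ' ']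
  have hnums : ∀ nf : Int → Int, nf = (fun x => (PySem.Int.ofChars?
            (PySem.Chars.join [] (List.map (fun line => [PySem.List.pyGetD line x ' ']) lines.dropLast))).getD 0) →
      (List.range (b-a)).map (nf ∘ (fun t : Nat => ((a+t : Nat) : Int)))
      = (List.range (b-a)).map
          (fun t => (PySem.Int.ofChars? (lines.dropLast.map (fun l => l.getD (a+t) ' '))).getD 0) := by
    intro nf hnf
    apply List.map_congr_left; intro t ht
    subst hnf
    simp only [Function.comp_apply, PySem.List.pyGetD_natCast]
    have harg : List.map (fun line : List Char => [line.getD (a+t) ' ']) lines.dropLast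
        = List.map (fun c => [c]) (List.map (fun line : List Char => line.getD (a+t) ' ') lines.dropLast) := by
      rw [List.map_map]; rfl
    rw [harg, PySem.Chars.join_nil_singletons]
  rw [hnums _ rfl]
  have hc := (pvOps_getD_mem lastL L k hk).2
  rw [← hops, ← hadef] at hc
  simp only [pvContrib, pySolve]
  rw [← hadef, ← hbdef, ← hlast]
  by_cases hplus : (lastL.getD a ' ' == '+') = true
  · rw [if_pos hplus, if_pos hplus]
  · rw [if_neg hplus, if_neg hplus]
    have hstar : (lastL.getD a ' ' == '*') = true := by
      rcases Bool.or_eq_true_iff.mp hc with h | h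
      · exact absurd h hplus
      · exact h
    rw [if_pos hstar]

theorem A_zero (s : String)
    (hne : (PySem.Str.splitlines s).map String.toList ≠ [])
    (hops : pvOps (((PySem.Str.splitlines s).map String.toList).getLastD [])
      (((PySem.Str.splitlines s).map String.toList).getLastD []).length = []) :
    part_two s = 0 := by
  unfold part_two
  set lines := (PySem.Str.splitlines s).map String.toList with hl
  set lastL := lines.getLastD [] with hlast
  have hlastD : lastL = lines.getLast hne := by
    rw [hlast, List.getLastD_eq_getLast?, List.getLast?_eq_some_getLast hne]; rfl
  have hgetlast : PySem.List.pyGetD lines (-1) [] = lastL := by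
    rw [PySem.List.pyGetD_neg_one lines [] hne, hlastD]
  simp only [hgetlast, opsInt_eq lastL lastL.length rfl, hops, List.map_nil, List.length_nil]
  simp [PySem.List.pyRange_one]

-- ----- B-side machinery: the right-to-left scan -----

-- the list of column indices [a-1, a-2, …, b] the scan accumulates while descending from a to b
def descIdx (a b : Nat) : List Int := (List.range (a - b)).map (fun i => ((a - 1 - i : Nat) : Int))

theorem descIdx_self (a : Nat) : descIdx a a = [] := by simp [descIdx]

theorem descIdx_length (a b : Nat) : (descIdx a b).length = a - b := by simp [descIdx]

theorem descIdx_cons (j b : Nat) (h : b ≤ j) : descIdx (j+1) b = (j:Int) :: descIdx j b := by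
  unfold descIdx
  rw [show j + 1 - b = (j - b) + 1 by omega, List.range_succ_eq_map]
  simp only [List.map_cons, List.map_map, Function.comp_def]
  refine congrArg₂ List.cons (by omega) ?_
  apply List.map_congr_left; intro i _; omega

theorem descIdx_append (b a : Nat) (h : a < b) : descIdx b (a+1) ++ [(a:Int)] = descIdx b a := by
  apply List.ext_getElem
  · simp [descIdx_length]; omega
  · intro i h1 h2
    rw [List.length_append, descIdx_length, List.length_singleton] at h1
    rw [descIdx_length] at h2
    rcases Nat.lt_or_ge i (b - (a+1)) with hi | hi
    · rw [List.getElem_append_left (by rw [descIdx_length]; exact hi)]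
      simp only [descIdx, List.getElem_map, List.getElem_range]
    · rw [List.getElem_append_right (by rw [descIdx_length]; exact hi)]
      simp only [List.getElem_singleton, descIdx, List.getElem_map, List.getElem_range]
      omega

theorem descIdx_eq_reverse (a b : Nat) :
    descIdx a b = ((List.range (a - b)).map (fun t => ((b + t : Nat) : Int))).reverse := by
  apply List.ext_getElem
  · simp [descIdx_length]
  · intro i h1 h2
    rw [descIdx_length] at h1
    rw [List.getElem_reverse]
    simp only [descIdx, List.getElem_map, List.getElem_range, List.length_map, List.length_range]
    omega

theorem altLoop_noop (body : List (List Char)) (opsRow : List Char) (f : Nat) (t : Int)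
    (P : List Int)
    (h : ∀ j, j < f → (opsRow.getD j ' ' == '+' || opsRow.getD j ' ' == '*') = false) :
    altLoop body opsRow f t P = t := by
  induction f generalizing P with
  | zero => rw [altLoop]
  | succ j ih =>
    rw [altLoop, h j (Nat.lt_succ_self j)]
    simp only [Bool.false_eq_true, if_false]
    exact ih _ (fun i hi => h i (by omega))

theorem altLoop_descend (body : List (List Char)) (opsRow : List Char) (m f : Nat) (t : Int)
    (P : List Int) (hmf : m ≤ f)
    (h : ∀ j, m ≤ j → j < f → (opsRow.getD j ' ' == '+' || opsRow.getD j ' ' == '*') = false) :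
    altLoop body opsRow f t P = altLoop body opsRow m t (P ++ descIdx f m) := by
  induction f, hmf using Nat.le_induction generalizing P with
  | base => rw [descIdx_self, List.append_nil]
  | succ f hmf ih =>
    rw [altLoop, h f hmf (Nat.lt_succ_self f)]
    simp only [Bool.false_eq_true, if_false]
    rw [ih (P ++ [(f:Int)]) (fun i hi1 hi2 => h i hi1 (by omega)),
      List.append_assoc, List.singleton_append, ← descIdx_cons f m hmf]

-- one streaming pass from the boundary above problem n equals the sum of the first n contributions
theorem altLoop_main (body : List (List Char)) (opsRow : List Char)
    (hgap : ∀ k, k + 1 < (pvOps opsRow opsRow.length).length →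
      (pvOps opsRow opsRow.length).getD k 0 + 1 < (pvOps opsRow opsRow.length).getD (k+1) 0)
    (n : Nat) (hn : n ≤ (pvOps opsRow opsRow.length).length) (t : Int) :
    altLoop body opsRow
      (if n < (pvOps opsRow opsRow.length).length
        then (pvOps opsRow opsRow.length).getD n 0 - 1 else opsRow.length) t []
    = t + ((List.range n).map
        (pvContrib (body ++ [opsRow]) opsRow.length (pvOps opsRow opsRow.length))).sum := by
  set ops := pvOps opsRow opsRow.length with hopsdef
  induction n generalizing t with
  | zero =>
    simp only [List.range_zero, List.map_nil, List.sum_nil, add_zero]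
    apply altLoop_noop
    intro j hj
    split_ifs at hj with h0
    · apply pvOps_notOp opsRow opsRow.length j
      · have := (pvOps_getD_mem opsRow opsRow.length 0 h0).1; rw [← hopsdef] at this; omega
      · intro k hk hkj
        have := pvOps_mono opsRow opsRow.length 0 k (Nat.zero_le k) hk
        rw [← hopsdef] at this hkj
        omega
    · apply pvOps_notOp opsRow opsRow.length j hj
      intro k hk _
      rw [← hopsdef] at hk
      omega
  | succ n ih =>
    have hn1 : n < ops.length := by omega
    have hop := (pvOps_getD_mem opsRow opsRow.length n hn1).2
    rw [← hopsdef] at hop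
    set m := ops.getD n 0 with hmdef
    have hmL : m < opsRow.length := by
      have := (pvOps_getD_mem opsRow opsRow.length n hn1).1; rw [← hopsdef] at this; exact this
    set b := (if n + 1 < ops.length then ops.getD (n+1) 0 - 1 else opsRow.length) with hbdef
    have hmb : m < b := by
      rw [hbdef]; split_ifs with h
      · have := hgap n h; omega
      · omega
    have hbL : b ≤ opsRow.length := by
      rw [hbdef]; split_ifs with h
      · have := (pvOps_getD_mem opsRow opsRow.length (n+1) h).1; rw [← hopsdef] at this; omega
      · omega
    rw [altLoop_descend body opsRow (m+1) b t [] (by omega)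
        (by
          intro j hj1 hj2
          apply pvOps_notOp opsRow opsRow.length j (by omega)
          intro k hk hkj
          rw [← hopsdef] at hk hkj
          rcases Nat.lt_or_ge k (n+1) with hkn | hkn
          · have := pvOps_mono opsRow opsRow.length k n (by omega) hn1
            rw [← hopsdef] at this; omega
          · have hn2 : n + 1 < ops.length := by omega
            have := pvOps_mono opsRow opsRow.length (n+1) k hkn hk
            rw [← hopsdef] at this
            rw [hbdef, if_pos hn2] at hj2
            omega)]
    rw [List.nil_append, altLoop, if_pos hop, descIdx_append b m hmb]
    have hval : (if opsRow.getD m ' ' == '+'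
          then ((descIdx b m).map (fun k => (PySem.Int.ofChars? (altColumn body k)).getD 0)).sum
          else ((descIdx b m).map (fun k => (PySem.Int.ofChars? (altColumn body k)).getD 0)).prod)
        = pvContrib (body ++ [opsRow]) opsRow.length ops n := by
      have hmap : (descIdx b m).map (fun k => (PySem.Int.ofChars? (altColumn body k)).getD 0)
          = ((List.range (b - m)).map
              (fun t' => (PySem.Int.ofChars?
                ((body ++ [opsRow]).dropLast.map (fun l => l.getD (m + t') ' '))).getD 0)).reverse := by
        rw [descIdx_eq_reverse b m, List.map_reverse]
        congr 1
        rw [List.map_map]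
        apply List.map_congr_left
        intro t' _
        simp only [Function.comp_apply, altColumn, List.dropLast_concat,
          PySem.List.pyGetD_natCast]
      rw [hmap]
      simp only [pvContrib, ← hmdef, ← hbdef, List.getLastD_concat]
      split_ifs with h
      · exact List.sum_reverse _
      · exact List.prod_reverse _
    rw [hval]
    have hstep := ih (t + pvContrib (body ++ [opsRow]) opsRow.length ops n) (by omega)
    rw [if_pos hn1] at hstep
    rw [hstep, List.range_succ, List.map_append, List.sum_append]
    simp only [List.map_cons, List.map_nil, List.sum_cons, List.sum_nil, add_zero]
    ring

theorem B_eq_ref (s : String)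
    (hne : (PySem.Str.splitlines s).map String.toList ≠ [])
    (hlen : ∀ l ∈ (PySem.Str.splitlines s).map String.toList,
      l.length = (((PySem.Str.splitlines s).map String.toList).headD []).length)
    (hgap : ∀ k, k + 1 < (pvOps (((PySem.Str.splitlines s).map String.toList).getLastD [])
        (((PySem.Str.splitlines s).map String.toList).headD []).length).length →
      (pvOps (((PySem.Str.splitlines s).map String.toList).getLastD [])
        (((PySem.Str.splitlines s).map String.toList).headD []).length).getD k 0 + 1 <
      (pvOps (((PySem.Str.splitlines s).map String.toList).getLastD [])
        (((PySem.Str.splitlines s).map String.toList).headD []).length).getD (k+1) 0) :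
    part_two_alt s =
      ((List.range (pvOps (((PySem.Str.splitlines s).map String.toList).getLastD [])
          (((PySem.Str.splitlines s).map String.toList).headD []).length).length).map
        (pvContrib ((PySem.Str.splitlines s).map String.toList)
          (((PySem.Str.splitlines s).map String.toList).headD []).length
          (pvOps (((PySem.Str.splitlines s).map String.toList).getLastD [])
            (((PySem.Str.splitlines s).map String.toList).headD []).length))).sum := by
  unfold part_two_alt
  set lines := (PySem.Str.splitlines s).map String.toList with hl
  set L := (lines.headD []).length with hL
  set lastL := lines.getLastD [] with hlast
  have hlastD : lastL = lines.getLast hne := by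
    rw [hlast, List.getLastD_eq_getLast?, List.getLast?_eq_some_getLast hne]; rfl
  have hlastmem : lastL ∈ lines := hlastD ▸ List.getLast_mem hne
  have hlastlen : lastL.length = L := hlen _ hlastmem
  have hrebuild : lines.dropLast ++ [lastL] = lines := by
    rw [hlastD]; exact List.dropLast_append_getLast hne
  have hmain := altLoop_main lines.dropLast lastL
    (by rw [hlastlen]; exact hgap)
    (pvOps lastL lastL.length).length (le_refl _) 0
  rw [if_neg (lt_irrefl _), hrebuild, zero_add, hlastlen] at hmain
  show altLoop lines.dropLast lastL lastL.length 0 [] =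
    (List.map (pvContrib lines L (pvOps lastL L)) (List.range (pvOps lastL L).length)).sum
  rw [hlastlen]
  exact hmain

theorem B_zero (s : String)
    (hne : (PySem.Str.splitlines s).map String.toList ≠ [])
    (hops : pvOps (((PySem.Str.splitlines s).map String.toList).getLastD [])
      (((PySem.Str.splitlines s).map String.toList).getLastD []).length = []) :
    part_two_alt s = 0 := by
  unfold part_two_alt
  apply altLoop_noop
  intro j hj
  apply pvOps_notOp _ _ j hj
  intro k hk _
  rw [hops] at hk
  simp at hk

-- ===== VERDICT (by name: the statement is the Claim_ definition above) =====
theorem part_two_spec : Claim_equal_part_two := by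
  intro s _ hpre
  obtain ⟨hne, hrest⟩ := hpre
  show part_two s = part_two_alt s
  rcases hrest with hops | ⟨hlen, hgap, _⟩
  · rw [A_zero s hne hops, B_zero s hne hops]
  · have hlastlen : (((PySem.Str.splitlines s).map String.toList).getLastD []).length
        = (((PySem.Str.splitlines s).map String.toList).headD []).length := by
      apply hlen
      rw [List.getLastD_eq_getLast?, List.getLast?_eq_some_getLast hne]
      exact List.getLast_mem hne
    have hgap' : ∀ k, k + 1 < (pvOps (((PySem.Str.splitlines s).map String.toList).getLastD [])
          (((PySem.Str.splitlines s).map String.toList).headD []).length).length →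
        (pvOps (((PySem.Str.splitlines s).map String.toList).getLastD [])
          (((PySem.Str.splitlines s).map String.toList).headD []).length).getD k 0 + 1 <
        (pvOps (((PySem.Str.splitlines s).map String.toList).getLastD [])
          (((PySem.Str.splitlines s).map String.toList).headD []).length).getD (k+1) 0 := by
      intro k hk
      have h2 := hgap k
      rw [hlastlen] at h2
      exact h2 (List.mem_range.mpr (Nat.lt_of_succ_lt hk)) hk
    rw [A_eq_ref s hne hlen, B_eq_ref s hne hlen hgap']
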